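-- pv_equiv track=rewrite | github.com/cyeinfpro/Realm | panel/app/routers/api_sync.py | _split_to_list
-- ===== SOURCE A (Python) =====
-- from typing import Any, Dict, List, Optional, Tuple
--
-- def _split_to_list(raw: Any, max_items: int = 128, item_max_len: int = 128) -> List[str]:
--     rows: List[Any]
--     if isinstance(raw, list):
--         rows = raw
--     elif isinstance(raw, str):
--         rows = [x for x in str(raw).replace(",", "\n").splitlines()]
--     else:
--         rows = []
--     out: List[str] = []
--     seen: set[str] = set()
--     for row in rows:
--         s = str(row or "").strip()
--         if not s:
--             continue
--         if len(s) > item_max_len: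
--             s = s[:item_max_len]
--         if s in seen:
--             continue
--         seen.add(s)
--         out.append(s)
--         if len(out) >= max_items:
--             break
--     return out
-- ===== SOURCE B (Python) =====
-- def _split_to_list(raw, max_items=128, item_max_len=128):
--     if isinstance(raw, list):
--         rows = raw
--     elif isinstance(raw, str):
--         rows = str(raw).replace(",", "\n").splitlines()
--     else:
--         rows = []
--     normalized = []
--     for row in rows:
--         s = str(row or "").strip()
--         if s:
--             normalized.append(s[:item_max_len])
--     deduped = list(dict.fromkeys(normalized))
--     return deduped[:max_items]
-- ===== Notes on version B (the rewrite author's own statement) =====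
-- stated objective: idiomatic
-- what changed: A's single interleaved loop (seen-set membership, conditional truncation, append, early break once the cap is hit) is decomposed into three idiomatic passes: normalize each row (strip, skip empties, unconditional s[:item_max_len]), deduplicate preserving first occurrence with list(dict.fromkeys(...)), and cap with a final [:max_items] slice instead of an early exit.
-- intended difference: When max_items <= 0 and raw contains at least one non-separator character, A still returns a 1-element list because its cap check runs only after the first append, while B returns the deduplicated items sliced to [:max_items] (e.g. [] for max_items=0); honouring a non-positive cap is the intended behaviour. — e.g. on _split_to_list("a", 0, 5): A returns ["a"], B returns []
import Mathlib
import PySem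

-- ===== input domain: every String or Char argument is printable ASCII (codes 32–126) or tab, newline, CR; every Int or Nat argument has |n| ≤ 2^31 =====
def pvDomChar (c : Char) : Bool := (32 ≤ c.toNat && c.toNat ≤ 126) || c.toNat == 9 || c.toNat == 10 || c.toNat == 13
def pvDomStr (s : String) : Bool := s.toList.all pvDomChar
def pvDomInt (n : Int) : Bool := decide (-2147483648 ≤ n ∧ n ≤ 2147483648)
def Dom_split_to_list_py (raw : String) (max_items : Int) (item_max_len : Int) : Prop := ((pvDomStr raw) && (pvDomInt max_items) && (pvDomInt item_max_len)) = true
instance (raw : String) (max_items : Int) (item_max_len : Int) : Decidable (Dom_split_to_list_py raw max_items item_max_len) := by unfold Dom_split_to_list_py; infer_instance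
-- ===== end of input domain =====

-- B replaces A's single interleaved loop (seen-set + append + early break) by a
-- normalize pass, an ordered dedup (dict.fromkeys), and a final slice cap (idiomatic decomposition).

-- ===== PORT A =====
-- A's for-loop over rows with `out`, `seen` and the early `break`.
def splitA_loop (max_items : Int) (item_max_len : Int) :
    List String → List String → PySem.Set String → List String
  | [], out, _ => out
  | row :: rest, out, seen =>
    let s := PySem.Str.strip row
    if s = "" then splitA_loop max_items item_max_len rest out seen
    else
      let s2 := if item_max_len < PySem.Str.len s then PySem.Str.slice s none (some item_max_len) else s
      if PySem.Set.contains seen s2 then splitA_loop max_items item_max_len rest out seen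
      else
        let out2 := out ++ [s2]
        if max_items ≤ (out2.length : Int) then out2
        else splitA_loop max_items item_max_len rest out2 (PySem.Set.add seen s2)

def split_to_list_py (raw : String) (max_items : Int) (item_max_len : Int) : List String :=
  let rows := PySem.Str.splitlines (PySem.Str.replace raw "," "\n")
  splitA_loop max_items item_max_len rows [] PySem.Set.empty

-- ===== PORT B =====
def split_to_list_py_alt (raw : String) (max_items : Int) (item_max_len : Int) : List String :=
  let rows := PySem.Str.splitlines (PySem.Str.replace raw "," "\n")
  let normalized := rows.foldl (fun acc row =>
    let s := PySem.Str.strip row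
    if s = "" then acc else acc ++ [PySem.Str.slice s none (some item_max_len)]) []
  let deduped := PySem.List.dedup normalized
  PySem.List.slice deduped none (some max_items)

-- ===== PRECONDITION & SPEC =====
-- When max_items ≤ 0 and raw contains any list item (a character that is not a
-- separator/whitespace), A returns a 1-element list (its cap check runs only after the first
-- append), while B returns the deduplicated items sliced to [:max_items] (so [] for
-- max_items = 0); honouring a non-positive cap is the intended behaviour.
def D_split_to_list_py (raw : String) (max_items : Int) (item_max_len : Int) : Prop :=
  max_items ≤ 0 ∧ raw.toList.any (fun c => !(([' ', '\t', '\n', '\r', ','] : List Char).contains c)) = true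
instance (raw : String) (max_items : Int) (item_max_len : Int) : Decidable (D_split_to_list_py raw max_items item_max_len) := by unfold D_split_to_list_py; infer_instance

def Spec_split_to_list_py (raw : String) (max_items : Int) (item_max_len : Int) (out : List String) : Prop := ¬ D_split_to_list_py raw max_items item_max_len → out = split_to_list_py_alt raw max_items item_max_len
instance (raw : String) (max_items : Int) (item_max_len : Int) (out : List String) : Decidable (Spec_split_to_list_py raw max_items item_max_len out) := by unfold Spec_split_to_list_py; infer_instance

def pvDiffWitness_split_to_list_py : String × Int × Int := ("a", 0, 5)
def pvDiffWitnessOut_split_to_list_py : (List String) × (List String) := (["a"], [])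

-- ===== CLAIM (what is proved, stated in full; the proofs are below) =====
def Claim_unchanged_split_to_list_py : Prop := ∀ (raw : String) (max_items : Int) (item_max_len : Int), Dom_split_to_list_py raw max_items item_max_len → Spec_split_to_list_py raw max_items item_max_len (split_to_list_py raw max_items item_max_len)
def Claim_changed_split_to_list_py : Prop := Dom_split_to_list_py (pvDiffWitness_split_to_list_py.1) (pvDiffWitness_split_to_list_py.2.1) (pvDiffWitness_split_to_list_py.2.2) ∧ D_split_to_list_py (pvDiffWitness_split_to_list_py.1) (pvDiffWitness_split_to_list_py.2.1) (pvDiffWitness_split_to_list_py.2.2) ∧ split_to_list_py (pvDiffWitness_split_to_list_py.1) (pvDiffWitness_split_to_list_py.2.1) (pvDiffWitness_split_to_list_py.2.2) = pvDiffWitnessOut_split_to_list_py.1 ∧ split_to_list_py_alt (pvDiffWitness_split_to_list_py.1) (pvDiffWitness_split_to_list_py.2.1) (pvDiffWitness_split_to_list_py.2.2) = pvDiffWitnessOut_split_to_list_py.2 ∧ pvDiffWitnessOut_split_to_list_py.1 ≠ pvDiffWitnessOut_split_to_list_py.2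

-- ===== LEMMAS AND PROOFS =====

-- the normalized strings (B's first pass), as a flatMap
def normFrom (iml : Int) (rows : List String) : List String :=
  rows.flatMap (fun row =>
    if PySem.Str.strip row = "" then []
    else [PySem.Str.slice (PySem.Str.strip row) none (some iml)])

-- ordered dedup of xs relative to an already-seen prefix
def dedupFrom (seen : List String) : List String → List String
  | [] => []
  | x :: xs => if seen.contains x then dedupFrom seen xs else x :: dedupFrom (seen ++ [x]) xs

lemma normB_foldl (iml : Int) : ∀ (rows : List String) (acc : List String),
    rows.foldl (fun acc row =>
      let s := PySem.Str.strip row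
      if s = "" then acc else acc ++ [PySem.Str.slice s none (some iml)]) acc
    = acc ++ normFrom iml rows := by
  intro rows
  induction rows with
  | nil => intro acc; simp [normFrom]
  | cons row rest ih =>
    intro acc
    by_cases hs : PySem.Str.strip row = "" <;>
      simp [List.foldl_cons, hs, ih, normFrom, List.flatMap_cons]

lemma foldl_add_eq_dedupFrom : ∀ (xs seen : List String),
    List.foldl PySem.Set.add seen xs = seen ++ dedupFrom seen xs := by
  intro xs
  induction xs with
  | nil => intro seen; simp [dedupFrom]
  | cons x xs ih =>
    intro seen
    by_cases hc : x ∈ seen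
    · simp [List.foldl_cons, PySem.Set.add, PySem.Set.contains, dedupFrom, hc, ih]
    · rw [List.foldl_cons,
        show PySem.Set.add seen x = seen ++ [x] from by
          simp [PySem.Set.add, PySem.Set.contains, hc],
        ih (seen ++ [x])]
      simp [dedupFrom, hc]

lemma trunc_eq (iml : Int) (s : String) :
    (if iml < PySem.Str.len s then PySem.Str.slice s none (some iml) else s)
      = PySem.Str.slice s none (some iml) := by
  split_ifs with h
  · rfl
  · have hlen : (s.length : Int) ≤ iml := by
      simp [PySem.Str.len] at h; omega
    have h0 : (0 : Int) ≤ iml := by omega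
    have htake : s.toList.length ≤ iml.toNat := by simp; omega
    simp [PySem.Str.slice, PySem.Chars.slice_eq_listSlice, PySem.List.slice_to _ h0,
      List.take_of_length_le htake]

-- A's loop (with seen = out) returns out ++ the next items of the deduped tail, capped.
lemma loopA_eq (mi iml : Int) : ∀ (rows : List String) (out : List String),
    (out.length : Int) < mi →
    splitA_loop mi iml rows out out
      = out ++ (dedupFrom out (normFrom iml rows)).take (mi - out.length).toNat := by
  intro rows
  induction rows with
  | nil => intro out _; simp [splitA_loop, normFrom, dedupFrom]
  | cons row rest ih =>
    intro out hlt
    by_cases hs : PySem.Str.strip row = ""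
    · simp [splitA_loop, hs, normFrom, List.flatMap_cons, ih out hlt]
    · rw [show splitA_loop mi iml (row :: rest) out out
          = (if PySem.Set.contains out
                (if iml < PySem.Str.len (PySem.Str.strip row)
                 then PySem.Str.slice (PySem.Str.strip row) none (some iml)
                 else PySem.Str.strip row)
             then splitA_loop mi iml rest out out
             else
               if mi ≤ (((out ++ [if iml < PySem.Str.len (PySem.Str.strip row)
                   then PySem.Str.slice (PySem.Str.strip row) none (some iml)
                   else PySem.Str.strip row]).length : Int))
               then out ++ [if iml < PySem.Str.len (PySem.Str.strip row)
                   then PySem.Str.slice (PySem.Str.strip row) none (some iml)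
                   else PySem.Str.strip row]
               else splitA_loop mi iml rest
                 (out ++ [if iml < PySem.Str.len (PySem.Str.strip row)
                   then PySem.Str.slice (PySem.Str.strip row) none (some iml)
                   else PySem.Str.strip row])
                 (PySem.Set.add out (if iml < PySem.Str.len (PySem.Str.strip row)
                   then PySem.Str.slice (PySem.Str.strip row) none (some iml)
                   else PySem.Str.strip row))) from by
          simp [splitA_loop, hs]]
      rw [trunc_eq iml (PySem.Str.strip row)]
      have hnorm : normFrom iml (row :: rest)
          = PySem.Str.slice (PySem.Str.strip row) none (some iml) :: normFrom iml rest := by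
        simp [normFrom, List.flatMap_cons, hs]
      rw [hnorm]
      generalize PySem.Str.slice (PySem.Str.strip row) none (some iml) = s2
      by_cases hc : s2 ∈ out
      · rw [if_pos (by simpa [PySem.Set.contains] using hc), ih out hlt]
        simp [dedupFrom, hc]
      · rw [if_neg (by simpa [PySem.Set.contains] using hc)]
        have hadd : PySem.Set.add out s2 = out ++ [s2] := by
          simp [PySem.Set.add, PySem.Set.contains, hc]
        have hd : dedupFrom out (s2 :: normFrom iml rest)
            = s2 :: dedupFrom (out ++ [s2]) (normFrom iml rest) := by
          simp [dedupFrom, hc]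
        by_cases hstop : mi ≤ (((out ++ [s2]).length : Int))
        · rw [if_pos hstop, hd]
          have hn : (mi - (out.length : Int)).toNat = 1 := by
            simp at hstop; omega
          rw [hn]
          simp
        · rw [if_neg hstop, hadd]
          have hlt2 : (((out ++ [s2]).length : Int)) < mi := by
            simp at hstop ⊢; omega
          rw [ih (out ++ [s2]) hlt2, hd]
          have hn : (mi - (out.length : Int)).toNat
              = (mi - (((out ++ [s2]).length : Int))).toNat + 1 := by
            simp; omega
          rw [hn, List.take_succ_cons]
          simp

-- if every row strips to "", A's loop keeps nothing
lemma loopA_skip (mi iml : Int) : ∀ (rows : List String) (out : List String)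
    (seen : PySem.Set String), (∀ r ∈ rows, PySem.Str.strip r = "") →
    splitA_loop mi iml rows out seen = out := by
  intro rows
  induction rows with
  | nil => intro out seen _; simp [splitA_loop]
  | cons row rest ih =>
    intro out seen h
    have hr : PySem.Str.strip row = "" := h row (by simp)
    simp [splitA_loop, hr, ih out seen (fun r hmem => h r (by simp [hmem]))]

-- characters: the separator set and whitespace
lemma delim_isspace (c : Char) (h : c ∈ ([' ', '\t', '\n', '\r', ','] : List Char))
    (hne : c ≠ ',') : PySem.Chars.isspace c = true := by
  simp only [List.mem_cons, List.not_mem_nil, or_false] at h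
  rcases h with h | h | h | h | h <;> subst h <;> first | decide | exact absurd rfl hne

lemma replaceGo_ws : ∀ (fuel : Nat) (l acc : List Char), l.length ≤ fuel →
    (∀ c ∈ l, c ∈ ([' ', '\t', '\n', '\r', ','] : List Char)) →
    (∀ c ∈ acc, PySem.Chars.isspace c = true) →
    ∀ c ∈ PySem.Chars.replace.go [','] ['\n'] fuel l acc, PySem.Chars.isspace c = true := by
  intro fuel
  induction fuel with
  | zero =>
    intro l acc hlen hl ha c hc
    have hnil : l = [] := by
      cases l with
      | nil => rfl
      | cons x xs => simp at hlen
    subst hnil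
    simp [PySem.Chars.replace.go] at hc
    exact ha c (by simpa using hc)
  | succ n ih =>
    intro l acc hlen hl ha c hc
    cases l with
    | nil =>
      simp [PySem.Chars.replace.go] at hc
      exact ha c (by simpa using hc)
    | cons x xs =>
      simp only [PySem.Chars.replace.go] at hc
      by_cases hx : x = ','
      · subst hx
        rw [if_pos (by simp [List.isPrefixOf])] at hc
        refine ih xs ('\n' :: acc) ?_ ?_ ?_ c (by simpa using hc)
        · simp at hlen ⊢; omega
        · intro d hd; exact hl d (by simp [hd])
        · intro d hd
          rcases List.mem_cons.mp hd with h | h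
          · subst h; decide
          · exact ha d h
      · rw [if_neg (by simp [List.isPrefixOf]; exact fun h => hx h.symm)] at hc
        refine ih xs (x :: acc) ?_ ?_ ?_ c hc
        · simp at hlen ⊢; omega
        · intro d hd; exact hl d (by simp [hd])
        · intro d hd
          rcases List.mem_cons.mp hd with h | h
          · subst h; exact delim_isspace d (hl d (by simp)) hx
          · exact ha d h

lemma splitGo_ws (isB : Char → Bool) (s cur : List Char) (acc : List (List Char))
    (hs : ∀ c ∈ s, PySem.Chars.isspace c = true)
    (hcur : ∀ c ∈ cur, PySem.Chars.isspace c = true)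
    (hacc : ∀ line ∈ acc, ∀ c ∈ line, PySem.Chars.isspace c = true) :
    ∀ line ∈ PySem.Chars.splitlines.go isB s cur acc, ∀ c ∈ line,
      PySem.Chars.isspace c = true := by
  fun_induction PySem.Chars.splitlines.go isB s cur acc with
  | case1 cur acc h =>
    intro line hline c hc
    exact hacc line (List.mem_reverse.mp hline) c hc
  | case2 cur acc h =>
    intro line hline c hc
    rcases List.mem_cons.mp (List.mem_reverse.mp hline) with h' | h'
    · subst h'; exact hcur c (List.mem_reverse.mp hc)
    · exact hacc line h' c hc
  | case3 rest cur acc ih =>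
    refine ih (fun c hc => hs c (by simp [hc])) (by simp) ?_
    intro line hline c hc
    rcases List.mem_cons.mp hline with h' | h'
    · subst h'; exact hcur c (List.mem_reverse.mp hc)
    · exact hacc line h' c hc
  | case4 c rest cur acc _hover _hB ihh =>
    refine ihh (fun d hd => hs d (by simp [hd])) (by simp) ?_
    intro line hline d hd
    rcases List.mem_cons.mp hline with h' | h'
    · subst h'; exact hcur d (List.mem_reverse.mp hd)
    · exact hacc line h' d hd
  | case5 c rest cur acc _hover _hB ihh =>
    refine ihh (fun d hd => hs d (by simp [hd])) ?_ hacc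
    intro d hd
    rcases List.mem_cons.mp hd with h' | h'
    · exact hs d (by simp [h'])
    · exact hcur d h'

lemma strip_nil_of_ws (l : List Char) (h : ∀ c ∈ l, PySem.Chars.isspace c = true) :
    PySem.Chars.strip l = [] := by
  have h1 : PySem.Chars.lstrip l = [] := by
    simp [PySem.Chars.lstrip, List.dropWhile_eq_nil_iff]
    exact h
  simp [PySem.Chars.strip, h1, PySem.Chars.rstrip]

lemma rows_strip_empty (raw : String)
    (hraw : ∀ c ∈ raw.toList, c ∈ ([' ', '\t', '\n', '\r', ','] : List Char)) :
    ∀ r ∈ PySem.Str.splitlines (PySem.Str.replace raw "," "\n"), PySem.Str.strip r = "" := by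
  intro r hr
  have hrepl : ∀ c ∈ (PySem.Str.replace raw "," "\n").toList, PySem.Chars.isspace c = true := by
    rw [PySem.Str.toList_replace]
    show ∀ c ∈ PySem.Chars.replace raw.toList [','] ['\n'], PySem.Chars.isspace c = true
    rw [show PySem.Chars.replace raw.toList [','] ['\n']
        = PySem.Chars.replace.go [','] ['\n'] raw.toList.length raw.toList [] from by
      simp [PySem.Chars.replace]]
    exact replaceGo_ws raw.toList.length raw.toList [] (le_refl _) hraw (by simp)
  have hmem : r.toList ∈ PySem.Chars.splitlines (PySem.Str.replace raw "," "\n").toList := by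
    rw [← PySem.Str.splitlines_map_toList]
    exact List.mem_map_of_mem hr
  have hws : ∀ c ∈ r.toList, PySem.Chars.isspace c = true := by
    exact splitGo_ws _ _ [] [] hrepl (by simp) (by simp) r.toList hmem
  have hstrip : PySem.Chars.strip r.toList = [] := strip_nil_of_ws r.toList hws
  show PySem.Str.strip r = ""
  simp [PySem.Str.strip, hstrip]

-- ===== VERDICT (by name: the statement is the Claim_ definition above) =====
theorem split_to_list_py_spec : Claim_unchanged_split_to_list_py := by
  intro raw mi iml _hdom hnd
  show splitA_loop mi iml (PySem.Str.splitlines (PySem.Str.replace raw "," "\n")) [] PySem.Set.empty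
      = PySem.List.slice (PySem.List.dedup
          ((PySem.Str.splitlines (PySem.Str.replace raw "," "\n")).foldl
            (fun acc row =>
              let s := PySem.Str.strip row
              if s = "" then acc else acc ++ [PySem.Str.slice s none (some iml)]) []))
          none (some mi)
  rw [normB_foldl iml _ [], List.nil_append]
  by_cases h1 : 1 ≤ mi
  · -- positive cap: A's loop = take of the deduped normalization = B
    rw [show (PySem.Set.empty : PySem.Set String) = ([] : List String) from rfl]
    rw [loopA_eq mi iml _ [] (by simpa using h1), List.nil_append]
    rw [show PySem.List.dedup (normFrom iml (PySem.Str.splitlines (PySem.Str.replace raw "," "\n")))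
        = dedupFrom [] (normFrom iml (PySem.Str.splitlines (PySem.Str.replace raw "," "\n"))) from by
      unfold PySem.List.dedup
      rw [PySem.Set.ofList_eq_foldl, foldl_add_eq_dedupFrom, List.nil_append]]
    rw [PySem.List.slice_to _ (by omega : (0:Int) ≤ mi)]
    simp
  · -- cap ≤ 0 and (¬ D_) means raw holds only separators: both sides are empty
    have hmi0 : mi ≤ 0 := by omega
    have hall : ∀ c ∈ raw.toList, c ∈ ([' ', '\t', '\n', '\r', ','] : List Char) := by
      intro c hc
      by_contra hno
      refine hnd ⟨hmi0, ?_⟩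
      rw [List.any_eq_true]
      exact ⟨c, hc, by simpa using hno⟩
    have hrows := rows_strip_empty raw hall
    have hnorm : normFrom iml (PySem.Str.splitlines (PySem.Str.replace raw "," "\n")) = [] := by
      rw [normFrom, List.flatMap_eq_nil_iff]
      intro r hrm
      simp [hrows r hrm]
    rw [loopA_skip mi iml _ [] PySem.Set.empty hrows, hnorm]
    rw [show PySem.List.dedup ([] : List String) = ([] : List String) from rfl]
    simp [PySem.List.slice]

theorem split_to_list_py_changed : Claim_changed_split_to_list_py := by
  unfold Claim_changed_split_to_list_py pvDiffWitness_split_to_list_py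
    pvDiffWitnessOut_split_to_list_py
  exact ⟨by decide, by decide, by decide, by decide, by decide⟩
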